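-- pv_equiv track=rewrite | github.com/Jacho8/be434-spring-2023-JH | project/01_caesar/caesar.py | shift_table
-- ===== SOURCE A (Python) =====
-- import string
--
-- letters = string.ascii_uppercase
--
-- def shift_table(shift, decode=False): #Codify based on shift number
--
--     table = {}
--
--     for char in letters:
--         index = letters.index(char)
--         if not decode:
--             shifted_index = (index + shift) % len(letters)
--         else:
--             shifted_index = (index - shift) % len(letters)
--         shifted_char = letters[shifted_index]
--         table[char] = shifted_char
--     return table
-- ===== SOURCE B (Python) =====
-- import string
--
-- letters = string.ascii_uppercase
--
-- def shift_table(shift, decode=False):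
--     # rotate the whole alphabet once by slicing, instead of per-char index math
--     s = (-shift if decode else shift) % len(letters)
--     rotated = letters[s:] + letters[:s]
--     return dict(zip(letters, rotated))
-- ===== Notes on version B (the rewrite author's own statement) =====
-- stated objective: idiomatic
-- what changed: B computes the rotated alphabet once in closed form by string slicing (letters[s:]+letters[:s] with s = (+/-shift) % 26) and zips it against the alphabet, instead of A's per-character loop doing letters.index(char) and (index +/- shift) % 26 for each letter.
import Mathlib
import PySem

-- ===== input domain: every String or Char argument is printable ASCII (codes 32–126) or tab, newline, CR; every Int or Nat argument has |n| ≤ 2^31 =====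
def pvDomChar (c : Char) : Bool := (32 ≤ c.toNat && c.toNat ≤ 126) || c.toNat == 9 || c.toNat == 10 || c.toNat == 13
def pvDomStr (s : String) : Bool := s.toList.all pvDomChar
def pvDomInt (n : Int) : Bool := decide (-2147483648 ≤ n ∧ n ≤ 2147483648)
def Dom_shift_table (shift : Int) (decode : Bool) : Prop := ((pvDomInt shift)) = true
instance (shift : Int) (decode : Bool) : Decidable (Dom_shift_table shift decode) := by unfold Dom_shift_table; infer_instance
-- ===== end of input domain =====

-- B builds the shifted alphabet once by slice rotation instead of per-character modular index arithmetic (idiomatic rewrite).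

-- module-level constant: letters = string.ascii_uppercase
def caesarLetters : List Char := "ABCDEFGHIJKLMNOPQRSTUVWXYZ".toList

-- ===== PORT A =====
def shift_table (shift : Int) (decode : Bool) : List (String × String) :=
  (caesarLetters.foldl (fun (table : PySem.Dict String String) (char : Char) =>
      let index : Int := (((PySem.List.index? caesarLetters char).getD 0 : Nat) : Int)
      let shifted_index : Int :=
        if !decode then PySem.Int.mod (index + shift) (caesarLetters.length : Int)
        else PySem.Int.mod (index - shift) (caesarLetters.length : Int)
      -- shifted_index is provably in range, so pyGet? is always `some`; getD supplies the type's default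
      let shifted_char : Char := (PySem.List.pyGet? caesarLetters shifted_index).getD ' '
      table.insert (String.ofList [char]) (String.ofList [shifted_char]))
    PySem.Dict.empty).items

-- ===== PORT B =====
def shift_table_alt (shift : Int) (decode : Bool) : List (String × String) :=
  let s : Int := PySem.Int.mod (if decode then -shift else shift) (caesarLetters.length : Int)
  let rotated : List Char :=
    PySem.List.slice caesarLetters (some s) none ++ PySem.List.slice caesarLetters none (some s)
  (PySem.Dict.ofList
    ((caesarLetters.zip rotated).map (fun p => (String.ofList [p.1], String.ofList [p.2])))).items

-- ===== PRECONDITION & SPEC =====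
def Spec_shift_table (shift : Int) (decode : Bool) (out : List (String × String)) : Prop := out = shift_table_alt shift decode
instance (shift : Int) (decode : Bool) (out : List (String × String)) : Decidable (Spec_shift_table shift decode out) := by unfold Spec_shift_table; infer_instance

-- ===== CLAIM (what is proved, stated in full; the proofs are below) =====
def Claim_equal_shift_table : Prop := ∀ (shift : Int) (decode : Bool), Dom_shift_table shift decode → Spec_shift_table shift decode (shift_table shift decode)

-- ===== LEMMAS AND PROOFS =====

-- both ports depend only on the residue r = (±shift) % 26
lemma shift_table_canon (shift : Int) (decode : Bool) :
    shift_table shift decode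
      = shift_table (PySem.Int.mod (if decode then -shift else shift) 26) false := by
  unfold shift_table
  have hidx : ∀ i : Int,
      (if !decode then PySem.Int.mod (i + shift) 26 else PySem.Int.mod (i - shift) 26)
        = PySem.Int.mod (i + PySem.Int.mod (if decode then -shift else shift) 26) 26 := by
    intro i
    have hm : ∀ a : Int, PySem.Int.mod a 26 = a % 26 :=
      fun a => PySem.Int.mod_eq_emod_of_pos (a := a) (by norm_num)
    cases decode <;> (simp only [hm, Bool.not_false, Bool.not_true]; simp; try omega)
  simp only [show (caesarLetters.length : Int) = 26 from rfl, hidx, Bool.not_false, if_true]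

lemma shift_table_alt_canon (shift : Int) (decode : Bool) :
    shift_table_alt shift decode
      = shift_table_alt (PySem.Int.mod (if decode then -shift else shift) 26) false := by
  unfold shift_table_alt
  have h : PySem.Int.mod (PySem.Int.mod (if decode then -shift else shift) 26) 26
      = PySem.Int.mod (if decode then -shift else shift) 26 := by
    simp only [PySem.Int.mod_eq_emod_of_pos (by norm_num : (0:Int) < 26)]; omega
  simp only [show (caesarLetters.length : Int) = 26 from rfl, if_neg Bool.false_ne_true, h]

lemma canon_eq (r : Int) (h0 : 0 ≤ r) (h1 : r < 26) :
    shift_table r false = shift_table_alt r false := by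
  interval_cases r <;> decide

-- ===== VERDICT (by name: the statement is the Claim_ definition above) =====
theorem shift_table_spec : Claim_equal_shift_table := by
  intro shift decode _
  unfold Spec_shift_table
  rw [shift_table_canon, shift_table_alt_canon]
  exact canon_eq _ (PySem.Int.mod_nonneg _ (by norm_num)) (PySem.Int.mod_lt _ (by norm_num))
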